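-- pv_equiv track=rewrite | github.com/bricetc/PassPy | fundef.py | has_easy_patterns
-- ===== SOURCE A (Python) =====
-- def has_easy_patterns(password, patterns):
--     # Check for sequential characters
--     for i in range(len(password) - 2):
--         if (ord(password[i+1]) == ord(password[i]) + 1) and (ord(password[i+2]) == ord(password[i]) + 2):
--             return True
--         if password[i] == password[i+1] == password[i+2]:  # Repeated characters
--             return True
--     # Check for patterns in the list
--     for pattern in patterns:
--         if pattern in password:
--             return True
--     return False
-- ===== SOURCE B (Python) =====
-- def has_easy_patterns(password, patterns):
--     # Triplet scan by sliding a window of three characters (zip), no index arithmetic.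
--     for a, b, c in zip(password, password[1:], password[2:]):
--         if ord(b) == ord(a) + 1 and ord(c) == ord(a) + 2:
--             return True
--         if a == b == c:
--             return True
--     # Pattern test: index every substring of password whose length occurs among the
--     # patterns into a hash set once, then each pattern is a single set lookup --
--     # the per-pattern scan of the password disappears.
--     lengths = {len(p) for p in patterns}
--     subs = {password[i:i + L] for L in lengths for i in range(len(password) - L + 1)}
--     return any(p in subs for p in patterns)
-- ===== Notes on version B (the rewrite author's own statement) =====
-- stated objective: alternative
-- what changed: The index-driven triplet loop becomes a structural sliding-window (zip) scan, and the per-pattern substring search of the password is replaced by building a hash set of all password substrings whose lengths occur among the patterns once, so each pattern is a single set lookup instead of a scan of the password.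
import Mathlib
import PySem

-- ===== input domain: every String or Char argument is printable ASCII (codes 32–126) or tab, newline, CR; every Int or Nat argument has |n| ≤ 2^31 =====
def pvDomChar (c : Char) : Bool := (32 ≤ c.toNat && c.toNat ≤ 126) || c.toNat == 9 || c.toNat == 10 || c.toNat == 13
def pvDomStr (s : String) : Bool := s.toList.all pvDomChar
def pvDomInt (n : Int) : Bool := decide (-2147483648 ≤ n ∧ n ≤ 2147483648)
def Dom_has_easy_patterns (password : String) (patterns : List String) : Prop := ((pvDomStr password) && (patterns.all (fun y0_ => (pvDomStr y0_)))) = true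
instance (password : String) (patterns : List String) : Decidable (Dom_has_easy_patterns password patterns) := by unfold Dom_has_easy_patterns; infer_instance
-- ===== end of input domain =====

-- B replaces A's index-driven triplet loop by a structural sliding-window scan and A's
-- per-pattern substring search of the password by one substring index (a set of all
-- password slices whose length occurs among the patterns) probed once per pattern.

-- ===== PORT A =====
-- Indices i, i+1, i+2 are always in range where the loop reads them, so pyGetD is exact here.
def has_easy_patterns (password : String) (patterns : List String) : Bool :=
  let cs := password.toList
  let trip := (PySem.List.pyRange 0 (PySem.Str.len password - 2) 1).foldl
    (fun acc i =>
      acc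
      || (((PySem.List.pyGetD cs (i + 1) ' ').toNat : Int) == ((PySem.List.pyGetD cs i ' ').toNat : Int) + 1
          && ((PySem.List.pyGetD cs (i + 2) ' ').toNat : Int) == ((PySem.List.pyGetD cs i ' ').toNat : Int) + 2)
      || (PySem.List.pyGetD cs i ' ' == PySem.List.pyGetD cs (i + 1) ' '
          && PySem.List.pyGetD cs (i + 1) ' ' == PySem.List.pyGetD cs (i + 2) ' '))
    false
  trip || patterns.foldl (fun acc p => acc || PySem.Str.isIn p password) false

-- ===== PORT B =====
-- the zip(s, s[1:], s[2:]) sliding window of Source B, as structural recursion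
def altTriples : List Char → Bool
  | a :: b :: c :: rest =>
    if ((b.toNat : Int) == (a.toNat : Int) + 1 && (c.toNat : Int) == (a.toNat : Int) + 2) then true
    else if (a == b && b == c) then true
    else altTriples (b :: c :: rest)
  | _ => false

def has_easy_patterns_alt (password : String) (patterns : List String) : Bool :=
  let cs := password.toList
  if altTriples cs then true
  else
    let lengths : PySem.Set Int := PySem.Set.ofList (patterns.map (fun p => PySem.Str.len p))
    let subs : PySem.Set (List Char) := PySem.Set.ofList
      (lengths.flatMap (fun L =>
        (PySem.List.pyRange 0 ((cs.length : Int) - L + 1) 1).map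
          (fun i => PySem.List.slice cs (some i) (some (i + L)))))
    patterns.any (fun p => PySem.Set.contains subs p.toList)

-- ===== PRECONDITION & SPEC =====
def Spec_has_easy_patterns (password : String) (patterns : List String) (out : Bool) : Prop := out = has_easy_patterns_alt password patterns
instance (password : String) (patterns : List String) (out : Bool) : Decidable (Spec_has_easy_patterns password patterns out) := by unfold Spec_has_easy_patterns; infer_instance

-- ===== CLAIM (what is proved, stated in full; the proofs are below) =====
def Claim_equal_has_easy_patterns : Prop := ∀ (password : String) (patterns : List String), Dom_has_easy_patterns password patterns → Spec_has_easy_patterns password patterns (has_easy_patterns password patterns)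

-- ===== LEMMAS AND PROOFS =====

lemma foldl_or2 {α : Type} (f g : α → Bool) (l : List α) (b : Bool) :
    l.foldl (fun acc x => acc || f x || g x) b = (b || l.any fun x => f x || g x) := by
  induction l generalizing b with
  | nil => simp
  | cons x t ih => rw [List.foldl_cons, ih]; simp [Bool.or_assoc]

lemma pvIteOr (x y r : Bool) : (if x then true else if y then true else r) = (x || y || r) := by
  cases x <;> cases y <;> cases r <;> rfl

-- A's per-index triplet condition, on Nat indices
def tcond (cs : List Char) (k : Nat) : Bool :=
  (((cs.getD (k + 1) ' ').toNat : Int) == ((cs.getD k ' ').toNat : Int) + 1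
     && ((cs.getD (k + 2) ' ').toNat : Int) == ((cs.getD k ' ').toNat : Int) + 2)
  || (cs.getD k ' ' == cs.getD (k + 1) ' ' && cs.getD (k + 1) ' ' == cs.getD (k + 2) ' ')

lemma tcond_succ (a : Char) (t : List Char) (k : Nat) :
    tcond (a :: t) (k + 1) = tcond t k := by
  simp [tcond]

lemma trip_eq (cs : List Char) :
    (List.range (cs.length - 2)).any (tcond cs) = altTriples cs := by
  match cs with
  | [] => simp [altTriples]
  | [a] => simp [altTriples]
  | [a, b] => simp [altTriples]
  | a :: b :: c :: t =>
    have ih := trip_eq (b :: c :: t)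
    simp only [List.length_cons] at ih ⊢
    rw [show t.length + 1 + 1 - 2 = t.length from by omega] at ih
    have hlen : t.length + 1 + 1 + 1 - 2 = t.length + 1 := by omega
    rw [hlen, List.range_succ_eq_map, List.any_cons, List.any_map]
    have h0 : tcond (a :: b :: c :: t) 0
        = (((b.toNat : Int) == (a.toNat : Int) + 1 && (c.toNat : Int) == (a.toNat : Int) + 2)
           || (a == b && b == c)) := by
      simp [tcond, List.getD]
    have hs : ((tcond (a :: b :: c :: t)) ∘ (· + 1)) = tcond (b :: c :: t) := by
      funext k; simp [tcond_succ]
    rw [h0, hs]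
    conv_rhs => rw [altTriples]
    rw [pvIteOr, ih]
termination_by cs.length

lemma any_congr_mem {α : Type} {l : List α} {f g : α → Bool} (h : ∀ x ∈ l, f x = g x) :
    l.any f = l.any g := by
  induction l with
  | nil => rfl
  | cons x t ih => simp only [List.any_cons, h x (by simp), ih (fun y hy => h y (by simp [hy]))]

lemma foldl_or1 {α : Type} (f : α → Bool) (l : List α) (b : Bool) :
    l.foldl (fun acc x => acc || f x) b = (b || l.any f) := by
  induction l generalizing b with
  | nil => simp
  | cons x t ih => rw [List.foldl_cons, ih]; simp [Bool.or_assoc]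

-- membership in B's substring index, for a pattern whose length is indexed
lemma contains_subs_eq (pw : String) (patterns : List String) (p : String) (hp : p ∈ patterns) :
    PySem.Set.contains (PySem.Set.ofList
      ((PySem.Set.ofList (patterns.map (fun q => PySem.Str.len q))).flatMap (fun L =>
        (PySem.List.pyRange 0 ((pw.toList.length : Int) - L + 1) 1).map
          (fun i => PySem.List.slice pw.toList (some i) (some (i + L)))))) p.toList
    = PySem.Str.isIn p pw := by
  rw [Bool.eq_iff_iff, PySem.Set.contains_iff, PySem.Str.isIn_iff_infix,
    PySem.Set.mem_ofList, List.mem_flatMap]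
  constructor
  · rintro ⟨L, hL, hmem⟩
    rw [List.mem_map] at hmem
    obtain ⟨i, hi, hsl⟩ := hmem
    rw [PySem.List.mem_pyRange_one] at hi
    obtain ⟨j, rfl⟩ : ∃ j : Nat, i = (j : Int) := ⟨i.toNat, (Int.toNat_of_nonneg hi.1).symm⟩
    rw [PySem.Set.mem_ofList, List.mem_map] at hL
    obtain ⟨q, hq, rfl⟩ := hL
    have hLq : PySem.Str.len q = ((q.toList.length : Nat) : Int) := by simp [pysem]
    rw [hLq, PySem.List.slice_natCast_add] at hsl
    rw [← hsl]
    exact ((List.take_prefix _ _).isInfix).trans ((List.drop_suffix _ _).isInfix)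
  · rintro ⟨s, t, hst⟩
    have hLp : PySem.Str.len p = ((p.toList.length : Nat) : Int) := by simp [pysem]
    refine ⟨PySem.Str.len p, ?_, ?_⟩
    · rw [PySem.Set.mem_ofList, List.mem_map]
      exact ⟨p, hp, rfl⟩
    · rw [List.mem_map]
      refine ⟨(s.length : Int), ?_, ?_⟩
      · rw [PySem.List.mem_pyRange_one]
        have hlen : pw.toList.length = s.length + p.toList.length + t.length := by
          rw [← hst]; simp; omega
        rw [hLp]
        constructor
        · positivity
        · omega
      · rw [hLp, PySem.List.slice_natCast_add, ← hst, List.append_assoc,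
          List.drop_left, List.take_left]

theorem has_easy_patterns_spec : Claim_equal_has_easy_patterns := by
  intro pw pats _
  unfold Spec_has_easy_patterns has_easy_patterns has_easy_patterns_alt
  dsimp only
  rw [foldl_or2, foldl_or1]
  have htrip : ((PySem.List.pyRange 0 (PySem.Str.len pw - 2) 1).any fun i =>
      (((PySem.List.pyGetD pw.toList (i + 1) ' ').toNat : Int) == ((PySem.List.pyGetD pw.toList i ' ').toNat : Int) + 1
        && ((PySem.List.pyGetD pw.toList (i + 2) ' ').toNat : Int) == ((PySem.List.pyGetD pw.toList i ' ').toNat : Int) + 2)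
      || (PySem.List.pyGetD pw.toList i ' ' == PySem.List.pyGetD pw.toList (i + 1) ' '
        && PySem.List.pyGetD pw.toList (i + 1) ' ' == PySem.List.pyGetD pw.toList (i + 2) ' '))
      = altTriples pw.toList := by
    rw [← trip_eq]
    have hlen : PySem.Str.len pw - 2 = ((pw.toList.length : Int) - 2) := by simp [pysem]
    rw [hlen, PySem.List.pyRange_one, List.any_map]
    have hn : ((pw.toList.length : Int) - 2 - 0).toNat = pw.toList.length - 2 := by omega
    rw [hn]
    apply any_congr_mem
    intro k _
    have h1 : ((0 : Int) + (k : Int) + 1) = (((k + 1 : Nat)) : Int) := by push_cast; ring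
    have h2 : ((0 : Int) + (k : Int) + 2) = (((k + 2 : Nat)) : Int) := by push_cast; ring
    have h0 : ((0 : Int) + (k : Int)) = ((k : Nat) : Int) := by ring
    simp only [Function.comp_apply]
    rw [h1, h2, h0]
    simp only [tcond, PySem.List.pyGetD_natCast]
  rw [htrip]
  cases h : altTriples pw.toList with
  | true => simp
  | false =>
    simp only [Bool.false_or, if_neg (Bool.false_ne_true)]
    apply any_congr_mem
    intro q hq
    exact (contains_subs_eq pw pats q hq).symm
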